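-- pv_equiv track=rewrite | github.com/MichaelJohnson144/forage-projects | jpmc/samples/task_one/server/server.py | clear_book
-- ===== SOURCE A (Python) =====
-- import operator
--
-- def add_book(book, order, size, _age=10):
--     # Add a new order and size to a book, and age the rest of the book:
--     yield order, size, _age
--     for o, s, age in book:
--         if age > 0:
--             yield o, s, age - 1
--
-- def clear_order(order, size, book, operation=operator.ge, _notional=0):
--     """Try to clear a sized order against a book, returning a tuple of `(notional, new_book)` if
--     successful, and None if not. `_Notional` is a recursive accumulator and should not be
--     provided by the caller:
--     """
--     (top_order, top_size, age), tail = book[0], book[1:]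
--     if operation(order, top_order):
--         _notional += min(size, top_size) * top_order
--         size_difference = top_size - size
--         if size_difference > 0:
--             return _notional, list(add_book(tail, top_order, size_difference, age))
--         elif len(tail) > 0:
--             return clear_order(order, -size_difference, tail, operation, _notional)
--
-- def clear_book(buy=None, sell=None):
--     # Clears all crossed orders from a buy and sell book, returning the new books uncrossed:
--     while buy and sell:
--         order, size, _ = buy[0]
--         new_book = clear_order(order, size, sell)
--         if new_book:
--             sell = new_book[1]
--             buy = buy[1:]
--         else:
--             break
--     return buy, sell
-- ===== SOURCE B (Python) =====
-- def clear_book(buy=None, sell=None):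
--     # Prefix-sum scan: instead of the recursive clear_order rewriting a remainder
--     # at each step, walk the crossable prefix of the sell book accumulating a
--     # cumulative size, and clear at the first entry whose cumulative size strictly
--     # exceeds the buy size; rebuild the aged sell book in one shot.
--     while buy:
--         order, size, _ = buy[0]
--         total, rest, hit = 0, sell, None
--         while rest:
--             top, ts, age = rest[0]
--             if order < top:
--                 break
--             total += ts
--             if total > size:
--                 hit = (top, age)
--                 break
--             rest = rest[1:]
--         if hit is None:
--             break
--         sell = [(hit[0], total - size, hit[1])] + [
--             (o, s, a - 1) for o, s, a in rest[1:] if a > 0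
--         ]
--         buy = buy[1:]
--     return buy, sell
-- ===== Notes on version B (the rewrite author's own statement) =====
-- stated objective: alternative
-- what changed: Replaces the recursive clear_order (remainder rewriting, notional accumulator, add_book generator) by a prefix-sum scan that finds the first crossable sell entry whose cumulative size strictly exceeds the buy size and rebuilds the aged sell book in one shot; the unused notional is dropped.
import Mathlib
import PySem

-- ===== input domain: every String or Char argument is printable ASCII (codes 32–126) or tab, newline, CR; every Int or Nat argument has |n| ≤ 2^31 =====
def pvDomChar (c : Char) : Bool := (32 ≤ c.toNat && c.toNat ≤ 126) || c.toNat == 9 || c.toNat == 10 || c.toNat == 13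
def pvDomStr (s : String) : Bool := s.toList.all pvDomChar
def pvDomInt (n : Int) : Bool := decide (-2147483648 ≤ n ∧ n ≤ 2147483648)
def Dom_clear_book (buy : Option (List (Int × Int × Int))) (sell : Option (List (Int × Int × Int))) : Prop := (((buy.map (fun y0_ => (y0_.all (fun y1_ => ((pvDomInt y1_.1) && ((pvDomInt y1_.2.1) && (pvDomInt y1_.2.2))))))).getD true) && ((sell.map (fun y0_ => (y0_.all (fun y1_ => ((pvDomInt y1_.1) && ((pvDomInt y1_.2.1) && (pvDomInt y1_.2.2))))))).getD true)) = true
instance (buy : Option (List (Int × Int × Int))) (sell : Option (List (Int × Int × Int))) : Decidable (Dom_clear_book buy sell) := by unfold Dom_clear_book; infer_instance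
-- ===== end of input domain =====

-- ===== PORT A =====
-- header: B replaces the recursive clear_order (remainder rewriting + notional
-- accumulator + add_book generator) by a prefix-sum scan of the crossable sell
-- prefix that clears at the first entry whose cumulative size exceeds the buy
-- size (alternative decomposition, same cost).

-- generator add_book: yield the new order, then age the rest of the book
def add_book (book : List (Int × Int × Int)) (order size age : Int) : List (Int × Int × Int) :=
  (order, size, age) ::
    book.foldr (fun e acc => if e.2.2 > 0 then (e.1, e.2.1, e.2.2 - 1) :: acc else acc) []

-- recursive clear_order; Python raises IndexError on an empty book, but clear_book
-- (the only caller) never passes one, so the [] branch is unreachable from clear_book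
def clear_order (order size : Int) (book : List (Int × Int × Int)) (notional : Int) :
    Option (Int × List (Int × Int × Int)) :=
  match book with
  | [] => none
  | (top, ts, age) :: tail =>
    if order ≥ top then
      if ts - size > 0 then
        some (notional + min size ts * top, add_book tail top (ts - size) age)
      else if tail.length > 0 then
        clear_order order (-(ts - size)) tail (notional + min size ts * top)
      else none
    else none

-- the while loop of clear_book, on unwrapped lists
def cbLoop : List (Int × Int × Int) → List (Int × Int × Int) →
    List (Int × Int × Int) × List (Int × Int × Int)
  | [], sell => ([], sell)
  | (o, s, a) :: rest, sell =>
    if sell = [] then ((o, s, a) :: rest, sell)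
    else
      match clear_order o s sell 0 with
      | some (_, newSell) => cbLoop rest newSell
      | none => ((o, s, a) :: rest, sell)

def clear_book (buy : Option (List (Int × Int × Int))) (sell : Option (List (Int × Int × Int))) : (Option (List (Int × Int × Int))) × (Option (List (Int × Int × Int))) :=
  match buy, sell with
  | some b, some s => let r := cbLoop b s; (some r.1, some r.2)
  | _, _ => (buy, sell)

-- ===== PORT B =====
-- B's inner scan: cumulative size `total` over the crossable prefix; a hit is the
-- first entry with total > size.  Returns (top, age, total, rest[1:]) of the hit
-- (the Python keeps `rest` and slices rest[1:]; the tail is carried directly).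
def bFind (order size : Int) : List (Int × Int × Int) → Int →
    Option (Int × Int × Int × List (Int × Int × Int))
  | [], _ => none
  | (top, ts, age) :: tail, total =>
    if order < top then none
    else if total + ts > size then some (top, age, total + ts, tail)
    else bFind order size tail (total + ts)

-- one outer-loop body: rebuild the sell book from the hit in one shot
def bStep (order size : Int) (sell : List (Int × Int × Int)) :
    Option (List (Int × Int × Int)) :=
  (bFind order size sell 0).map fun r =>
    (r.1, r.2.2.1 - size, r.2.1) ::
      (r.2.2.2.filter fun e => e.2.2 > 0).map fun e => (e.1, e.2.1, e.2.2 - 1)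

-- `while buy:` — an empty/None sell simply yields no hit
def bLoop : List (Int × Int × Int) → List (Int × Int × Int) →
    List (Int × Int × Int) × List (Int × Int × Int)
  | [], sell => ([], sell)
  | b :: rest, sell =>
    match bStep b.1 b.2.1 sell with
    | some newSell => bLoop rest newSell
    | none => (b :: rest, sell)

def clear_book_alt (buy : Option (List (Int × Int × Int))) (sell : Option (List (Int × Int × Int))) : (Option (List (Int × Int × Int))) × (Option (List (Int × Int × Int))) :=
  match buy with
  | none => (buy, sell)
  | some b =>
    match sell with
    | none => (buy, sell)
    | some s => let r := bLoop b s; (some r.1, some r.2)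

-- ===== PRECONDITION & SPEC =====
def Spec_clear_book (buy : Option (List (Int × Int × Int))) (sell : Option (List (Int × Int × Int))) (out : (Option (List (Int × Int × Int))) × (Option (List (Int × Int × Int)))) : Prop := out = clear_book_alt buy sell
instance (buy : Option (List (Int × Int × Int))) (sell : Option (List (Int × Int × Int))) (out : (Option (List (Int × Int × Int))) × (Option (List (Int × Int × Int)))) : Decidable (Spec_clear_book buy sell out) := by unfold Spec_clear_book; infer_instance

-- ===== CLAIM (what is proved, stated in full; the proofs are below) =====
def Claim_equal_clear_book : Prop := ∀ (buy : Option (List (Int × Int × Int))) (sell : Option (List (Int × Int × Int))), Dom_clear_book buy sell → Spec_clear_book buy sell (clear_book buy sell)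

-- ===== LEMMAS AND PROOFS =====
theorem add_book_eq (book : List (Int × Int × Int)) (order size age : Int) :
    add_book book order size age =
      (order, size, age) ::
        (book.filter (fun e => e.2.2 > 0)).map (fun e => (e.1, e.2.1, e.2.2 - 1)) := by
  unfold add_book
  induction book with
  | nil => simp
  | cons h t ih =>
    obtain ⟨o, s, a⟩ := h
    by_cases ha : a > 0 <;> simp [ha, List.foldr_cons] at * <;> simp [ih]

-- clear_order with remainder `size - total` matches bFind with accumulator `total`
theorem clear_order_eq_bFind (order size : Int) (book : List (Int × Int × Int)) :
    ∀ total notional,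
      (clear_order order (size - total) book notional).map Prod.snd =
        (bFind order size book total).map (fun r =>
          (r.1, r.2.2.1 - size, r.2.1) ::
            (r.2.2.2.filter fun e => e.2.2 > 0).map fun e => (e.1, e.2.1, e.2.2 - 1)) := by
  induction book with
  | nil => intro total notional; rfl
  | cons h t ih =>
    intro total notional
    obtain ⟨top, ts, age⟩ := h
    conv_lhs => rw [clear_order]
    conv_rhs => rw [bFind]
    by_cases hop : order ≥ top
    · have hnl : ¬ order < top := not_lt.mpr hop
      rw [if_pos hop, if_neg hnl]
      by_cases hd : ts - (size - total) > 0
      · have hd' : total + ts > size := by omega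
        rw [if_pos hd, if_pos hd']
        simp [add_book_eq]
        omega
      · have hd' : ¬ total + ts > size := by omega
        rw [if_neg hd, if_neg hd']
        cases t with
        | nil => simp [bFind]
        | cons th tt =>
          rw [if_pos (by simp : ((th :: tt : List (Int × Int × Int))).length > 0)]
          have h := ih (total + ts) (notional + min (size - total) ts * top)
          rw [show size - (total + ts) = -(ts - (size - total)) by ring] at h
          exact h
    · rw [if_neg hop, if_pos (lt_of_not_ge hop)]
      rfl

theorem clear_order_eq_bStep (order size : Int) (sell : List (Int × Int × Int)) (notional : Int) :
    (clear_order order size sell notional).map Prod.snd = bStep order size sell := by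
  have h := clear_order_eq_bFind order size sell 0 notional
  simpa [bStep] using h

theorem loop_eq (buy : List (Int × Int × Int)) :
    ∀ sell, cbLoop buy sell = bLoop buy sell := by
  induction buy with
  | nil => intro sell; rfl
  | cons h t ih =>
    intro sell
    obtain ⟨o, s, a⟩ := h
    simp only [cbLoop, bLoop]
    by_cases hs : sell = []
    · subst hs; simp [bStep, bFind]
    · simp only [if_neg hs]
      have hmap := clear_order_eq_bStep o s sell 0
      cases hco : clear_order o s sell 0 with
      | none => rw [hco] at hmap; simp at hmap; simp [← hmap]
      | some p =>
        rw [hco] at hmap; simp at hmap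
        simp only [← hmap, ih]

-- ===== VERDICT (by name: the statement is the Claim_ definition above) =====
theorem clear_book_spec : Claim_equal_clear_book := by
  intro buy sell _
  unfold Spec_clear_book clear_book clear_book_alt
  cases buy with
  | none => rfl
  | some b =>
    cases sell with
    | none => rfl
    | some s => simp [loop_eq]
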